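-- pv_equiv track=rewrite | github.com/j3r3miah/InterviewPractice | foo.py | usernameDisparity
-- ===== SOURCE A (Python) =====
-- def usernameDisparity(inputs):
--     rv = []
--     for s in inputs:
--         count = len(s)
--         for x in range(1, len(s)):
--             pi = x
--             si = 0
--             while pi < len(s) and s[pi] == s[si]:
--                 pi += 1
--                 si += 1
--             count += si
--         rv.append(count)
--     return rv
-- ===== SOURCE B (Python) =====
-- def _z_sum(s):
--     # Z-algorithm: z[i] = length of longest common prefix of s and s[i:], O(n) total.
--     n = len(s)
--     z = [0] * n
--     l = r = 0
--     for i in range(1, n):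
--         z0 = min(r - i, z[i - l]) if i < r else 0
--         zi = z0
--         while i + zi < n and s[zi] == s[i + zi]:
--             zi += 1
--         z[i] = zi
--         if i + zi > r:
--             l, r = i, i + zi
--     return n + sum(z)
--
-- def usernameDisparity(inputs):
--     return [_z_sum(s) for s in inputs]
-- ===== Notes on version B (the rewrite author's own statement) =====
-- stated objective: alternative
-- what changed: Replaced the naive per-shift character rescan by the Z-algorithm, which computes all prefix-match lengths of a string in a single pass maintaining an [l,r) match window (worst-case linear per string vs A's worst-case quadratic, though comparable on typical random inputs).
import Mathlib
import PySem

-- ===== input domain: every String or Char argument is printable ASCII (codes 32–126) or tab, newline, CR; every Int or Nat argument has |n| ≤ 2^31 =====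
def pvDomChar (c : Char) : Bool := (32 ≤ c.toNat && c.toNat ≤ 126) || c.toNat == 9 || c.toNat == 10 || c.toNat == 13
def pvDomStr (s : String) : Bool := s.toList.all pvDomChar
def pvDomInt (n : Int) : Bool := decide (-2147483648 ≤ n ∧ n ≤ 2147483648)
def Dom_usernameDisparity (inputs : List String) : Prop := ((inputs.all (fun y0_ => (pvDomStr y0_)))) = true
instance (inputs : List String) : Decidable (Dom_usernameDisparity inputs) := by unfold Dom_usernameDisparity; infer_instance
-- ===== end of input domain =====

-- B replaces A's naive per-shift rescan by the Z-algorithm (one pass per string with an [l,r) match window); equal outputs proved.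


-- ===== PORT A =====
-- the inner `while pi < len(s) and s[pi] == s[si]` loop, returning the final si
-- (structural recursion on an explicit bound; the guard `pi < cl.length` is the Python condition)
def loopAF (cl : List Char) : Nat → Nat → Nat → Nat
  | 0, _, si => si
  | fuel + 1, pi, si =>
    if pi < cl.length then
      if cl[pi]? == cl[si]? then loopAF cl fuel (pi + 1) (si + 1) else si
    else si

def loopA (cl : List Char) (pi si : Nat) : Nat := loopAF cl (cl.length - pi) pi si

def usernameDisparity (inputs : List String) : List Int :=
  inputs.foldl (fun rv s =>
    let cl := s.toList
    let count := (List.range' 1 (cl.length - 1)).foldl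
      (fun (c : Int) x => c + (loopA cl x 0 : Int)) (cl.length : Int)
    rv ++ [count]) []

-- ===== PORT B =====
-- the extension loop `while i + zi < n and s[zi] == s[i + zi]`, returning the final zi
-- (structural recursion on an explicit bound; the guard `i + k < cl.length` is the Python condition)
def zextF (cl : List Char) (i : Nat) : Nat → Nat → Nat
  | 0, k => k
  | fuel + 1, k =>
    if i + k < cl.length then
      if cl[k]? == cl[i + k]? then zextF cl i fuel (k + 1) else k
    else k

def zext (cl : List Char) (i k : Nat) : Nat := zextF cl i (cl.length - (i + k)) k

-- one iteration of the Z-algorithm loop body, state (z, l, r)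
def stepB (cl : List Char) (st : List Nat × Nat × Nat) (i : Nat) : List Nat × Nat × Nat :=
  let z := st.1
  let l := st.2.1
  let r := st.2.2
  let z0 := if i < r then min (r - i) (z.getD (i - l) 0) else 0
  let zi := zext cl i z0
  let z' := z.set i zi
  if r < i + zi then (z', i, i + zi) else (z', l, r)

-- `_z_sum(s)`: run the Z-algorithm, return n + sum(z)
def zsum (cl : List Char) : Int :=
  let n := cl.length
  let z := ((List.range' 1 (n - 1)).foldl (stepB cl) (List.replicate n 0, 0, 0)).1
  (n : Int) + (z.sum : Int)

def usernameDisparity_alt (inputs : List String) : List Int :=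
  inputs.map (fun s => zsum s.toList)

-- ===== PRECONDITION & SPEC =====
def Spec_usernameDisparity (inputs : List String) (out : List Int) : Prop := out = usernameDisparity_alt inputs
instance (inputs : List String) (out : List Int) : Decidable (Spec_usernameDisparity inputs out) := by unfold Spec_usernameDisparity; infer_instance

-- ===== CLAIM (what is proved, stated in full; the proofs are below) =====
def Claim_equal_usernameDisparity : Prop := ∀ (inputs : List String), Dom_usernameDisparity inputs → Spec_usernameDisparity inputs (usernameDisparity inputs)

-- ===== LEMMAS AND PROOFS =====

-- longest common prefix length of two character lists
def lcpL : List Char → List Char → Nat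
  | a :: as, b :: bs => if a == b then lcpL as bs + 1 else 0
  | _, _ => 0

-- z-function value: prefix-match length of cl with its suffix at i
def Zf (cl : List Char) (i : Nat) : Nat := lcpL cl (cl.drop i)

-- contents of the z list after indices 1..i-1 have been processed
def fZ (cl : List Char) (i j : Nat) : Nat := if 1 ≤ j ∧ j < i then Zf cl j else 0

-- loop invariant of the Z-algorithm at the start of iteration i
def InvB (cl : List Char) (i : Nat) (st : List Nat × Nat × Nat) : Prop :=
  st.1 = (List.range cl.length).map (fZ cl i)
  ∧ st.2.2 ≤ cl.length ∧ st.2.1 < i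
  ∧ (st.2.1 < st.2.2 → 1 ≤ st.2.1 ∧
      (cl.drop st.2.1).take (st.2.2 - st.2.1) = cl.take (st.2.2 - st.2.1))

theorem lcpL_le_right : ∀ a b : List Char, lcpL a b ≤ b.length := by
  intro a
  induction a with
  | nil => intro b; cases b <;> simp [lcpL]
  | cons x as ih =>
    intro b
    cases b with
    | nil => simp [lcpL]
    | cons y bs =>
      simp only [lcpL]
      split
      · simpa using ih bs
      · simp

theorem lcpL_comm : ∀ a b : List Char, lcpL a b = lcpL b a := by
  intro a
  induction a with
  | nil => intro b; cases b <;> simp [lcpL]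
  | cons x as ih =>
    intro b
    cases b with
    | nil => simp [lcpL]
    | cons y bs =>
      simp only [lcpL]
      by_cases h : x = y
      · subst h; simp [ih bs]
      · have h' : ¬ y = x := fun hyx => h hyx.symm
        simp [h, h']

theorem lcpL_take : ∀ a b : List Char, a.take (lcpL a b) = b.take (lcpL a b) := by
  intro a
  induction a with
  | nil => intro b; cases b <;> simp [lcpL]
  | cons x as ih =>
    intro b
    cases b with
    | nil => simp [lcpL]
    | cons y bs =>
      simp only [lcpL]
      split
      · rename_i h
        simp only [List.take_succ_cons]
        rw [beq_iff_eq] at h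
        rw [h, ih bs]
      · simp

theorem lcpL_ge_of_take : ∀ (m : Nat) (a b : List Char), m ≤ a.length → m ≤ b.length →
    a.take m = b.take m → m ≤ lcpL a b := by
  intro m
  induction m with
  | zero => intro _ _ _ _ _; exact Nat.zero_le _
  | succ k ih =>
    intro a b ha hb ht
    cases a with
    | nil => simp at ha
    | cons x as =>
      cases b with
      | nil => simp at hb
      | cons y bs =>
        simp only [List.take_succ_cons, List.cons.injEq] at ht
        simp only [lcpL, ht.1, beq_self_eq_true, if_true]
        have := ih as bs (by simpa using ha) (by simpa using hb) ht.2
        omega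

theorem lcpL_drop : ∀ (k : Nat) (a b : List Char), k ≤ lcpL a b →
    lcpL a b = k + lcpL (a.drop k) (b.drop k) := by
  intro k
  induction k with
  | zero => intro a b _; simp
  | succ j ih =>
    intro a b h
    cases a with
    | nil => cases b <;> simp [lcpL] at h
    | cons x as =>
      cases b with
      | nil => simp [lcpL] at h
      | cons y bs =>
        simp only [lcpL] at h ⊢
        by_cases hxy : (x == y) = true
        · simp only [hxy, if_true] at h ⊢
          have := ih as bs (by omega)
          simp only [List.drop_succ_cons]
          omega
        · simp [hxy] at h

-- A's while loop computes si + lcp of the two suffixes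
theorem loopAF_eq (cl : List Char) : ∀ (fuel pi si : Nat), cl.length ≤ pi + fuel → si ≤ pi →
    loopAF cl fuel pi si = si + lcpL (cl.drop pi) (cl.drop si) := by
  intro fuel
  induction fuel with
  | zero =>
    intro pi si hf hle
    have hd : cl.drop pi = [] := List.drop_eq_nil_of_le (by omega)
    simp only [loopAF, hd]
    cases cl.drop si <;> simp [lcpL]
  | succ fuel ih =>
    intro pi si hf hle
    by_cases h : pi < cl.length
    · have hsi : si < cl.length := by omega
      simp only [loopAF]
      rw [if_pos h]
      by_cases hc : (cl[pi]? == cl[si]?) = true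
      · rw [if_pos hc, ih (pi + 1) (si + 1) (by omega) (by omega)]
        rw [List.drop_eq_getElem_cons h, List.drop_eq_getElem_cons hsi]
        simp only [List.getElem?_eq_getElem, h, hsi, beq_iff_eq, Option.some.injEq] at hc
        simp only [lcpL, hc, beq_self_eq_true, if_true]
        omega
      · rw [if_neg hc]
        rw [List.drop_eq_getElem_cons h, List.drop_eq_getElem_cons hsi]
        simp only [List.getElem?_eq_getElem, h, hsi, beq_iff_eq, Option.some.injEq] at hc
        simp [lcpL, hc]
    · simp only [loopAF]
      rw [if_neg h]
      have hd : cl.drop pi = [] := List.drop_eq_nil_of_le (by omega)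
      rw [hd]
      cases cl.drop si <;> simp [lcpL]

theorem loopA_eq (cl : List Char) : ∀ (pi si : Nat), si ≤ pi →
    loopA cl pi si = si + lcpL (cl.drop pi) (cl.drop si) := by
  intro pi si hle
  exact loopAF_eq cl (cl.length - pi) pi si (by omega) hle

-- B's extension loop computes k + lcp of the suffixes at k and i + k
theorem zextF_eq (cl : List Char) (i : Nat) : ∀ (fuel k : Nat), cl.length ≤ i + k + fuel →
    zextF cl i fuel k = k + lcpL (cl.drop k) (cl.drop (i + k)) := by
  intro fuel
  induction fuel with
  | zero =>
    intro k hf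
    have hd : cl.drop (i + k) = [] := List.drop_eq_nil_of_le (by omega)
    simp only [zextF, hd]
    cases cl.drop k <;> simp [lcpL]
  | succ fuel ih =>
    intro k hf
    by_cases h : i + k < cl.length
    · have hk : k < cl.length := by omega
      simp only [zextF]
      rw [if_pos h]
      by_cases hc : (cl[k]? == cl[i + k]?) = true
      · rw [if_pos hc, ih (k + 1) (by omega)]
        rw [List.drop_eq_getElem_cons hk, List.drop_eq_getElem_cons h]
        simp only [List.getElem?_eq_getElem, h, hk, beq_iff_eq, Option.some.injEq] at hc
        simp only [lcpL, hc, beq_self_eq_true, if_true]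
        have hik : i + (k + 1) = i + k + 1 := by omega
        rw [hik]
        omega
      · rw [if_neg hc]
        rw [List.drop_eq_getElem_cons hk, List.drop_eq_getElem_cons h]
        simp only [List.getElem?_eq_getElem, h, hk, beq_iff_eq, Option.some.injEq] at hc
        simp [lcpL, hc]
    · simp only [zextF]
      rw [if_neg h]
      have hd : cl.drop (i + k) = [] := List.drop_eq_nil_of_le (by omega)
      rw [hd]
      cases cl.drop k <;> simp [lcpL]

theorem zext_eq (cl : List Char) (i : Nat) : ∀ (k : Nat),
    zext cl i k = k + lcpL (cl.drop k) (cl.drop (i + k)) := by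
  intro k
  exact zextF_eq cl i (cl.length - (i + k)) k (by omega)

-- setting one in-range entry of a map-over-range list
theorem set_map_range {f : Nat → Nat} {n i v : Nat} (hi : i < n) :
    ((List.range n).map f).set i v
      = (List.range n).map (fun j => if j = i then v else f j) := by
  apply List.ext_getElem?
  intro j
  rw [List.getElem?_set]
  by_cases hj : j < n
  · by_cases hij : i = j
    · subst hij
      simp [hj]
    · have hji : ¬ j = i := fun h => hij h.symm
      simp [hj, hij, hji]
  · by_cases hij : i = j
    · exact absurd (hij ▸ hi) hj
    · simp [hj, hij]

-- a take-equality restricts to any shorter length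
theorem take_eq_take_of_le {x y : List Char} {M m : Nat}
    (h : x.take M = y.take M) (hm : m ≤ M) : x.take m = y.take m := by
  simpa [List.take_take, Nat.min_eq_left hm] using congrArg (List.take m) h

-- the window bound: the starting value min (r-i) (z[i-l]) never exceeds the true z-value
theorem z0_le (cl : List Char) (l i r : Nat) (hl : 1 ≤ l) (hli : l < i) (hir : i < r)
    (hr : r ≤ cl.length)
    (W : (cl.drop l).take (r - l) = cl.take (r - l)) :
    min (r - i) (Zf cl (i - l)) ≤ Zf cl i := by
  set m := min (r - i) (Zf cl (i - l)) with hm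
  have hmr : m ≤ r - i := le_min_iff.mp le_rfl |>.1
  have hmz : m ≤ lcpL cl (cl.drop (i - l)) := le_min_iff.mp le_rfl |>.2
  apply lcpL_ge_of_take
  · omega
  · simp only [List.length_drop]; omega
  · have h1 : cl.take m = (cl.drop (i - l)).take m :=
      take_eq_take_of_le (lcpL_take cl (cl.drop (i - l))) hmz
    have hW := congrArg (List.drop (i - l)) W
    rw [List.drop_take, List.drop_take, List.drop_drop] at hW
    have e1 : r - l - (i - l) = r - i := by omega
    have e2 : l + (i - l) = i := by omega
    rw [e1, e2] at hW
    have h3 : (cl.drop (i - l)).take m = (cl.drop i).take m :=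
      take_eq_take_of_le hW.symm hmr
    rw [h1, h3]

-- one iteration preserves the invariant
theorem stepB_inv (cl : List Char) (i : Nat) (st : List Nat × Nat × Nat)
    (hInv : InvB cl i st) (hin : i < cl.length) :
    InvB cl (i + 1) (stepB cl st i) := by
  obtain ⟨z, l, r⟩ := st
  obtain ⟨hz, hr, hli, hw⟩ := hInv
  simp only at hz hr hli hw
  have hi1 : 1 ≤ i := by omega
  -- the starting value is at most the true z-value
  have hz0 : (if i < r then min (r - i) (z.getD (i - l) 0) else 0) ≤ Zf cl i := by
    split_ifs with hir
    · have hlr : l < r := by omega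
      obtain ⟨hl1, W⟩ := hw hlr
      have hil : i - l < cl.length := by omega
      rw [hz, PySem.List.getD_map_range _ _ _ _ hil]
      have hfz : fZ cl i (i - l) = Zf cl (i - l) := by
        unfold fZ
        rw [if_pos (by omega)]
      rw [hfz]
      exact z0_le cl l i r hl1 hli hir hr W
    · exact Nat.zero_le _
  -- the extension loop lands exactly on the true z-value
  have hzi : zext cl i (if i < r then min (r - i) (z.getD (i - l) 0) else 0) = Zf cl i := by
    rw [zext_eq, Zf]
    have h := lcpL_drop _ cl (cl.drop i) (by simpa [Zf] using hz0)
    rw [List.drop_drop] at h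
    exact h.symm
  -- the updated z list
  have hznew : z.set i (Zf cl i) = (List.range cl.length).map (fZ cl (i + 1)) := by
    rw [hz, set_map_range hin]
    apply List.map_congr_left
    intro j hj
    unfold fZ
    by_cases hji : j = i
    · subst hji
      rw [if_pos rfl, if_pos (by omega)]
    · rw [if_neg hji]
      by_cases hc : 1 ≤ j ∧ j < i
      · rw [if_pos hc, if_pos (by omega)]
      · rw [if_neg hc, if_neg (by omega)]
  have hZle : Zf cl i ≤ cl.length - i := by
    have h := lcpL_le_right cl (cl.drop i)
    simpa [Zf, List.length_drop] using h
  simp only [stepB]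
  rw [hzi]
  split_ifs with hupd
  · refine ⟨hznew, by (try dsimp only); omega, by (try dsimp only); omega,
      fun hlt => ⟨hi1, ?_⟩⟩
    dsimp only at hlt ⊢
    have e : i + Zf cl i - i = Zf cl i := by omega
    rw [e]
    exact (lcpL_take cl (cl.drop i)).symm
  · exact ⟨hznew, hr, by (try dsimp only); omega, hw⟩

-- the fold over range' preserves the invariant
theorem fold_inv (cl : List Char) : ∀ (m i : Nat) (st : List Nat × Nat × Nat),
    i + m ≤ cl.length → InvB cl i st →
    InvB cl (i + m) ((List.range' i m).foldl (stepB cl) st) := by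
  intro m
  induction m with
  | zero => intro i st _ h; simpa using h
  | succ m ih =>
    intro i st hle h
    rw [List.range'_succ, List.foldl_cons]
    have := ih (i + 1) (stepB cl st i) (by omega) (stepB_inv cl i st h (by omega))
    have e : i + 1 + m = i + (m + 1) := by omega
    rwa [e] at this
  -- note: 1 ≤ i is not needed separately: InvB gives st.2.1 < i

-- fold to sum on the A side
theorem foldl_add_loopA (cl : List Char) (L : List Nat) (c : Int) :
    L.foldl (fun (c : Int) x => c + (loopA cl x 0 : Int)) c
      = c + (((L.map (fun x => Zf cl x)).sum : Nat) : Int) := by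
  rw [PySem.List.foldl_add]
  congr 1
  rw [Nat.cast_list_sum, List.map_map]
  simp only [Function.comp_def]
  congr 1
  apply List.map_congr_left
  intro x _
  have hx : loopA cl x 0 = Zf cl x := by
    rw [loopA_eq cl x 0 (Nat.zero_le x), List.drop_zero, lcpL_comm]
    simp [Zf]
  simp [hx]

-- per-string equality
theorem per_string (cl : List Char) :
    (List.range' 1 (cl.length - 1)).foldl
      (fun (c : Int) x => c + (loopA cl x 0 : Int)) (cl.length : Int) = zsum cl := by
  simp only [zsum]
  rcases Nat.eq_zero_or_pos cl.length with h0 | hpos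
  · simp [h0]
  · have hInv0 : InvB cl 1 (List.replicate cl.length 0, 0, 0) := by
      refine ⟨?_, by dsimp only; omega, by dsimp only; omega, fun h => absurd h (by dsimp only; omega)⟩
      have : (List.range cl.length).map (fZ cl 1) = (List.range cl.length).map (fun _ => 0) := by
        apply List.map_congr_left
        intro j _
        unfold fZ
        rw [if_neg (by omega)]
      rw [this, List.map_const']
      simp
    have hfin := fold_inv cl (cl.length - 1) 1 (List.replicate cl.length 0, 0, 0)
      (by omega) hInv0
    have e : 1 + (cl.length - 1) = cl.length := by omega
    rw [e] at hfin
    rw [hfin.1, foldl_add_loopA]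
    congr 1
    congr 1
    -- sums agree
    have hrange : List.range cl.length = 0 :: List.range' 1 (cl.length - 1) := by
      obtain ⟨k, hk⟩ : ∃ k, cl.length = k + 1 := ⟨cl.length - 1, by omega⟩
      rw [hk]
      simp [List.range_eq_range', List.range'_succ]
    rw [hrange, List.map_cons]
    have h0v : fZ cl cl.length 0 = 0 := by unfold fZ; rw [if_neg (by omega)]
    rw [h0v]
    have : (List.range' 1 (cl.length - 1)).map (fZ cl cl.length)
        = (List.range' 1 (cl.length - 1)).map (fun x => Zf cl x) := by
      apply List.map_congr_left
      intro j hj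
      rw [List.mem_range'_1] at hj
      unfold fZ
      rw [if_pos (by omega)]
    rw [this]
    simp

-- ===== VERDICT (by name: the statement is the Claim_ definition above) =====
theorem usernameDisparity_spec : Claim_equal_usernameDisparity := by
  intro inputs _
  unfold Spec_usernameDisparity usernameDisparity usernameDisparity_alt
  rw [PySem.List.foldl_append_singleton_eq_map]
  rw [List.nil_append]
  apply List.map_congr_left
  intro s _
  exact per_string s.toList
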